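-- pv_equiv track=rewrite | github.com/diegoldsv/cursosplatzi | Python/Projects/hangman_game/hangman_game.py | get_hangman
-- ===== SOURCE A (Python) =====
-- def get_hangman(_lines):
--     if _lines == 0: return ""
--     hangman = """
--                (    )
--              (        )
--                (    )
--                 |  |
--                 |  |
--     ( ) ------- |  |
--     \\ /         |  |
--      |          |  |
--     / \\         |  |"""
--     idx = 0
--     blocks = 0
--     for letter in hangman:
--         if letter == "\n":
--             blocks += 1
--         idx += 1
--         if blocks == _lines:
--             return hangman[:idx]
--     return hangman
-- ===== SOURCE B (Python) =====
-- _HANGMAN_LINES = [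
--     "",
--     "               (    )",
--     "             (        )",
--     "               (    )",
--     "                |  |",
--     "                |  |",
--     "    ( ) ------- |  |",
--     "    \\ /         |  |",
--     "     |          |  |",
--     "    / \\         |  |",
-- ]
--
--
-- def get_hangman(_lines):
--     if _lines == 0:
--         return ""
--     if 0 < _lines < len(_HANGMAN_LINES):
--         return "\n".join(_HANGMAN_LINES[:_lines]) + "\n"
--     return "\n".join(_HANGMAN_LINES)
-- ===== Notes on version B (the rewrite author's own statement) =====
-- stated objective: simpler
-- what changed: Replaces the char-by-char newline-counting scan and index slice with a static table of the art's lines: B joins the first _lines entries with newlines (plus the trailing newline) and returns the full join for out-of-range counts, never scanning the string.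
import Mathlib
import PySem

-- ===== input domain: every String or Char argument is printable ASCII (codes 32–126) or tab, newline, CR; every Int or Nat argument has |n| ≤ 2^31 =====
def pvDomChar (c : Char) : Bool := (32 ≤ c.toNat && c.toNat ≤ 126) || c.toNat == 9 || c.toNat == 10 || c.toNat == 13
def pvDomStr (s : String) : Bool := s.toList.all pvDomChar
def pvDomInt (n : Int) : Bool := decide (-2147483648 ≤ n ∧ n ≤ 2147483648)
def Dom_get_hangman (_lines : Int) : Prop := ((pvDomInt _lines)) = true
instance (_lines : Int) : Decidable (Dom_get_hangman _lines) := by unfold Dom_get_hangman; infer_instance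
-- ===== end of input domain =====

-- B replaces A's char-by-char newline-counting scan with a static table of the
-- 10 art lines joined with newlines; objective: simpler.

-- ===== PORT A =====
-- A's hangman string literal, as its character list (string facts are proved
-- on the List Char side, per the PySem convention).
def pvHangmanChars : List Char := ['\n', ' ', ' ', ' ', ' ', ' ', ' ', ' ', ' ', ' ', ' ', ' ', ' ', ' ', ' ', ' ', '(', ' ', ' ', ' ', ' ', ')', '\n', ' ', ' ', ' ', ' ', ' ', ' ', ' ', ' ', ' ', ' ', ' ', ' ', ' ', '(', ' ', ' ', ' ', ' ', ' ', ' ', ' ', ' ', ')', '\n', ' ', ' ', ' ', ' ', ' ', ' ', ' ', ' ', ' ', ' ', ' ', ' ', ' ', ' ', ' ', '(', ' ', ' ', ' ', ' ', ')', '\n', ' ', ' ', ' ', ' ', ' ', ' ', ' ', ' ', ' ', ' ', ' ', ' ', ' ', ' ', ' ', ' ', '|', ' ', ' ', '|', '\n', ' ', ' ', ' ', ' ', ' ', ' ', ' ', ' ', ' ', ' ', ' ', ' ', ' ', ' ', ' ', ' ', '|', ' ', ' ', '|', '\n', ' ', ' ', ' ', ' ', '(', ' ', ')', ' ', '-', '-',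 '-', '-', '-', '-', '-', ' ', '|', ' ', ' ', '|', '\n', ' ', ' ', ' ', ' ', '\\', ' ', '/', ' ', ' ', ' ', ' ', ' ', ' ', ' ', ' ', ' ', '|', ' ', ' ', '|', '\n', ' ', ' ', ' ', ' ', ' ', '|', ' ', ' ', ' ', ' ', ' ', ' ', ' ', ' ', ' ', ' ', '|', ' ', ' ', '|', '\n', ' ', ' ', ' ', ' ', '/', ' ', '\\', ' ', ' ', ' ', ' ', ' ', ' ', ' ', ' ', ' ', '|', ' ', ' ', '|']

-- A's for-loop over the characters of hangman, with the early return
-- hangman[:idx]; idx is always ≥ 0, so Python's slice hangman[:idx] is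
-- exactly List.take idx.
def pvALoop (target : Int) (hang : List Char) : List Char → Nat → Int → List Char
  | [], _, _ => hang
  | letter :: rest, idx, blocks =>
    let blocks := if letter = '\n' then blocks + 1 else blocks
    let idx := idx + 1
    if blocks = target then hang.take idx
    else pvALoop target hang rest idx blocks

def get_hangman (_lines : Int) : String :=
  if _lines = 0 then "" else
  String.ofList (pvALoop _lines pvHangmanChars pvHangmanChars 0 0)

-- ===== PORT B =====
-- B's line table _HANGMAN_LINES (plain String literals; B never scans characters).
def pvLines : List String :=
  [ ""
  , "               (    )"
  , "             (        )"
  , "               (    )"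
  , "                |  |"
  , "                |  |"
  , "    ( ) ------- |  |"
  , "    \\ /         |  |"
  , "     |          |  |"
  , "    / \\         |  |" ]

-- "\n".join(lines[:_lines]) + "\n"; on the middle branch 0 < _lines, so the
-- Python slice lines[:_lines] is exactly List.take _lines.toNat.
def get_hangman_alt (_lines : Int) : String :=
  if _lines = 0 then ""
  else if 0 < _lines ∧ _lines < (pvLines.length : Int) then
    String.intercalate "\n" (pvLines.take _lines.toNat) ++ "\n"
  else String.intercalate "\n" pvLines

-- ===== PRECONDITION & SPEC =====
def Spec_get_hangman (_lines : Int) (out : String) : Prop := out = get_hangman_alt _lines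
instance (_lines : Int) (out : String) : Decidable (Spec_get_hangman _lines out) := by unfold Spec_get_hangman; infer_instance

-- ===== CLAIM (what is proved, stated in full; the proofs are below) =====
def Claim_equal_get_hangman : Prop := ∀ (_lines : Int), Dom_get_hangman _lines → Spec_get_hangman _lines (get_hangman _lines)

-- ===== LEMMAS AND PROOFS =====

-- A's loop never returns early when the target is below the counter or beyond
-- blocks + (number of newlines left): the increment-only counter cannot hit it.
theorem pvALoop_miss (target : Int) (hang : List Char) :
    ∀ (s : List Char) (idx : Nat) (blocks : Int),
      (target < blocks ∨ blocks + (s.count '\n' : Int) < target) →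
      pvALoop target hang s idx blocks = hang := by
  intro s
  induction s with
  | nil => intro idx blocks _; rfl
  | cons c rest ih =>
    intro idx blocks h
    by_cases hc : c = '\n' <;>
      simp only [pvALoop, hc, if_pos, if_false] <;>
      rw [if_neg, ih] <;> simp_all <;> omega

set_option maxRecDepth 100000 in
theorem pvHangman_count : (pvHangmanChars.count '\n' : Int) = 9 := by decide

set_option maxRecDepth 100000 in
theorem pvFull_eq : String.ofList pvHangmanChars = String.intercalate "\n" pvLines := by decide

-- ===== VERDICT (by name: the statement is the Claim_ definition above) =====
set_option maxRecDepth 100000 in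
theorem get_hangman_spec : Claim_equal_get_hangman := by
  intro n _
  unfold Spec_get_hangman get_hangman get_hangman_alt
  rcases lt_trichotomy n 0 with hneg | hz | hpos
  · -- negative target: A's counter never matches; both return the full string
    have hnotB : ¬(0 < n ∧ n < ((pvLines.length : Int))) := by
      rintro ⟨h1, h2⟩; omega
    rw [if_neg (show ¬(n = 0) by omega), if_neg hnotB,
        pvALoop_miss n _ _ 0 0 (by omega), pvFull_eq, if_neg (show ¬(n = 0) by omega)]
  · subst hz; rfl
  · rw [if_neg (by omega)]
    by_cases hbig : 10 ≤ n
    · -- target exceeds the 9 newlines: A returns the full string, and so does B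
      have hlen : ((pvLines.length : Int)) = 10 := by decide
      have hnotB : ¬(0 < n ∧ n < ((pvLines.length : Int))) := by
        rintro ⟨h1, h2⟩; rw [hlen] at h2; omega
      rw [if_neg hnotB,
          pvALoop_miss n _ _ 0 0 (by rw [pvHangman_count]; omega), pvFull_eq,
          if_neg (show ¬(n = 0) by omega)]
    · -- 1 ≤ n ≤ 9: finitely many cases, each checked by evaluation
      have h9 : n ≤ 9 := by omega
      have h1 : 1 ≤ n := hpos
      interval_cases n <;> decide
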